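-- pv_equiv track=rewrite | github.com/arbelbu/arbitrage | arbitrage.py | get_best_option
-- ===== SOURCE A (Python) =====
-- def get_best_option(options_):
--     highest = 0
--     list_of_best_options = []
--     for option in options_:
--         if option[0] > highest:
--             highest = option[0]
--             list_of_best_options = [option]
--         elif option[0] == highest:
--             list_of_best_options.append(option)
--     return list_of_best_options
-- ===== SOURCE B (Python) =====
-- def get_best_option(options_):
--     m = max((o[0] for o in options_), default=0)
--     m = max(0, m)
--     return [o for o in options_ if o[0] == m]
-- ===== Notes on version B (the rewrite author's own statement) =====
-- stated objective: simpler
-- what changed: Replaced the fused max-and-collect loop (which resets/extends an accumulator list) with two separate passes: compute the winning threshold max(0, max of first elements), then filter the list once for that value.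
import Mathlib
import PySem

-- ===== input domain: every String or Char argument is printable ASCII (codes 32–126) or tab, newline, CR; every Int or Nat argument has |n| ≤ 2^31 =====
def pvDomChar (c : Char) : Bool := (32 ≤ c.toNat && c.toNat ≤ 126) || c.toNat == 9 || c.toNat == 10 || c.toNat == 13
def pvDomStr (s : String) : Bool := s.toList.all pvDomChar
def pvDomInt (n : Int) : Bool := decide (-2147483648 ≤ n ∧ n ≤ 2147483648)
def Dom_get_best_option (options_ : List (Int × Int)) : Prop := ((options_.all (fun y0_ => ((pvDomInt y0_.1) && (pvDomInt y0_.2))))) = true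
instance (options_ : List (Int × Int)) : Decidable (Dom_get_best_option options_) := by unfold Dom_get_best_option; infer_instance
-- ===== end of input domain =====

-- B replaces A's fused max-and-collect loop with a max pass (floored at 0) plus a filter pass: simpler, same O(n).


-- ===== PORT A =====
-- faithful port of A: single fold carrying (highest, list_of_best_options)
def get_best_option (options_ : List (Int × Int)) : List (Int × Int) :=
  (options_.foldl
    (fun (s : Int × List (Int × Int)) (option : Int × Int) =>
      if option.1 > s.1 then (option.1, [option])
      else if option.1 = s.1 then (s.1, s.2 ++ [option])
      else s)
    (0, [])).2

-- ===== PORT B =====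
-- port of B: max pass (Python max(gen, default=0), then max(0, m)) + filter pass
def get_best_option_alt (options_ : List (Int × Int)) : List (Int × Int) :=
  let m0 := (PySem.List.max? (options_.map Prod.fst) (fun x => x)).getD 0
  let m := max 0 m0
  options_.filter (fun o => o.1 == m)

-- ===== PRECONDITION & SPEC =====
def Spec_get_best_option (options_ : List (Int × Int)) (out : List (Int × Int)) : Prop := out = get_best_option_alt options_
instance (options_ : List (Int × Int)) (out : List (Int × Int)) : Decidable (Spec_get_best_option options_ out) := by unfold Spec_get_best_option; infer_instance

-- ===== CLAIM (what is proved, stated in full; the proofs are below) =====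
def Claim_equal_get_best_option : Prop := ∀ (options_ : List (Int × Int)), Dom_get_best_option options_ → Spec_get_best_option options_ (get_best_option options_)

-- ===== LEMMAS AND PROOFS =====

-- running max of first components
def pvRunMax (l : List (Int × Int)) (m : Int) : Int :=
  l.foldl (fun a o => max a o.1) m

lemma pv_le_runMax (l : List (Int × Int)) (m : Int) : m ≤ pvRunMax l m := by
  induction l generalizing m with
  | nil => simp [pvRunMax]
  | cons o t ih =>
    have := ih (max m o.1)
    simp only [pvRunMax, List.foldl_cons] at this ⊢
    exact le_trans (le_max_left _ _) this

lemma pv_max_runMax (l : List (Int × Int)) (a b : Int) :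
    max a (pvRunMax l b) = pvRunMax l (max a b) := by
  induction l generalizing b with
  | nil => simp [pvRunMax]
  | cons o t ih =>
    simp only [pvRunMax, List.foldl_cons] at ih ⊢
    rw [ih (max b o.1), max_assoc]

-- the fused loop of A, characterised: final highest is the running max,
-- final list is the filter at that value (reset if the max strictly rose)
lemma pv_loop (l : List (Int × Int)) (m : Int) (acc : List (Int × Int)) :
    l.foldl
      (fun (s : Int × List (Int × Int)) (option : Int × Int) =>
        if option.1 > s.1 then (option.1, [option])
        else if option.1 = s.1 then (s.1, s.2 ++ [option])
        else s)
      (m, acc)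
    = (pvRunMax l m,
       if m < pvRunMax l m then l.filter (fun o => o.1 == pvRunMax l m)
       else acc ++ l.filter (fun o => o.1 == m)) := by
  induction l generalizing m acc with
  | nil => simp [pvRunMax]
  | cons o t ih =>
    have hM : pvRunMax (o :: t) m = pvRunMax t (max m o.1) := by
      simp [pvRunMax]
    simp only [List.foldl_cons]
    by_cases h1 : o.1 > m
    · simp only [if_pos h1]
      rw [ih o.1 [o]]
      have hmax : max m o.1 = o.1 := by omega
      have hle : o.1 ≤ pvRunMax t o.1 := pv_le_runMax t o.1
      rw [hM, hmax]
      have hmlt : m < pvRunMax t o.1 := lt_of_lt_of_le h1 hle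
      rw [if_pos hmlt]
      by_cases h2 : o.1 < pvRunMax t o.1
      · have hne : (o.1 == pvRunMax t o.1) = false := by
          simp; omega
        rw [if_pos h2]
        simp [hne]
      · have heq : o.1 = pvRunMax t o.1 := le_antisymm hle (by omega)
        rw [if_neg h2]
        simp [← heq]
    · simp only [if_neg h1]
      by_cases h2 : o.1 = m
      · simp only [if_pos h2]
        rw [ih m (acc ++ [o])]
        have hmax : max m o.1 = m := by omega
        rw [hM, hmax]
        by_cases h3 : m < pvRunMax t m
        · have hne : (o.1 == pvRunMax t m) = false := by simp; omega
          rw [if_pos h3, if_pos h3]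
          simp [hne]
        · have heq : (o.1 == m) = true := by simp [h2]
          rw [if_neg h3, if_neg h3]
          simp [heq, List.append_assoc]
      · simp only [if_neg h2]
        rw [ih m acc]
        have hmax : max m o.1 = m := by omega
        rw [hM, hmax]
        by_cases h3 : m < pvRunMax t m
        · have hne : (o.1 == pvRunMax t m) = false := by simp; omega
          rw [if_pos h3, if_pos h3]
          simp [hne]
        · have hne : (o.1 == m) = false := by simp; omega
          rw [if_neg h3, if_neg h3]
          simp [hne]

-- ===== VERDICT (by name: the statement is the Claim_ definition above) =====
theorem get_best_option_spec : Claim_equal_get_best_option := by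
  intro l _
  unfold Spec_get_best_option get_best_option get_best_option_alt
  rcases l with _ | ⟨o, t⟩
  · simp [PySem.List.max?]
  · simp only [List.map_cons, PySem.List.max?_id_cons, Option.getD_some]
    have hfold : (t.map Prod.fst).foldl max o.1 = pvRunMax t o.1 := by
      simp [pvRunMax, List.foldl_map]
    have hm : max 0 ((t.map Prod.fst).foldl max o.1) = pvRunMax (o :: t) 0 := by
      rw [hfold, pv_max_runMax]
      simp [pvRunMax]
    rw [pv_loop (o :: t) 0 []]
    rw [hm]
    by_cases h : (0 : Int) < pvRunMax (o :: t) 0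
    · simp [if_pos h]
    · have h0 : pvRunMax (o :: t) 0 = 0 :=
        le_antisymm (by omega) (pv_le_runMax (o :: t) 0)
      rw [if_neg h, h0]
      simp
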